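-- pv_equiv track=rewrite | github.com/jyothivedurada/KaggleDocGen | dl_split_model/inference/inference.py | adjust_splits
-- ===== SOURCE A (Python) =====
-- LIST_OF_STRUCTURES = tuple(["def", "for ", "while", "class", "with"])
--
-- def adjust_splits(original_splits, original_code):
--     adjusted_splits, index_in_the_code, indentations = [], 0, []
--     for original_split in original_splits:
--         if original_split[0].strip().startswith(LIST_OF_STRUCTURES):
--             gap_length = len(original_split[0]) - len(original_split[0].lstrip())
--             index = index_in_the_code + 1
--             while(index < len(original_code)):
--                 if len(original_code[index]) - len(original_code[index].lstrip()) <= gap_length: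
--                     break
--                 index += 1
--             new_split = original_code[index_in_the_code: index]
--             adjusted_splits.append(new_split)
--             indentations.append(gap_length)
--             index_in_the_code += len(original_split)
--         else:
--             gap_length = len(original_split[0]) - len(original_split[0].lstrip())
--             adjusted_splits.append(original_split)
--             indentations.append(gap_length)
--             index_in_the_code += len(original_split)
--     return adjusted_splits, indentations
-- ===== SOURCE B (Python) =====
-- LIST_OF_STRUCTURES = tuple(["def", "for ", "while", "class", "with"])
--
-- def adjust_splits(original_splits, original_code):
--     # Offline right-to-left sweep: a monotonic stack of indentation records over
--     # precomputed indents answers each "first line at or below this indent" query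
--     # by binary search instead of a linear rescan of the code.
--     n = len(original_code)
--     indents = [len(line) - len(line.lstrip()) for line in original_code]
--     gaps = [len(s[0]) - len(s[0].lstrip()) for s in original_splits]
--     starts = []
--     pos = 0
--     for s in original_splits:
--         starts.append(pos)
--         pos += len(s)
--     rows = list(zip(original_splits, gaps, starts))
--     stack = []          # (position, indent); indents strictly increasing along the list
--     frontier = n - 1
--     out_rev = []
--     for s, g, st in reversed(rows):
--         if s[0].strip().startswith(LIST_OF_STRUCTURES):
--             low = st + 1
--             while frontier >= low:
--                 ind = indents[frontier]
--                 while stack and stack[-1][1] >= ind: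
--                     stack.pop()
--                 stack.append((frontier, ind))
--                 frontier -= 1
--             lo_i, hi_i = 0, len(stack)
--             while lo_i < hi_i:
--                 mid = (lo_i + hi_i) // 2
--                 if stack[mid][1] <= g:
--                     lo_i = mid + 1
--                 else:
--                     hi_i = mid
--             end = stack[lo_i - 1][0] if lo_i > 0 else n
--             out_rev.append(original_code[st:end])
--         else:
--             out_rev.append(s)
--     return out_rev[::-1], gaps
-- ===== Notes on version B (the rewrite author's own statement) =====
-- stated objective: alternative
-- what changed: A rescans the code line by line (recomputing each line's indentation from the string) for every block-structure split; B precomputes all indentations once and answers every 'first following line at or below this indent' query offline, sweeping the splits right-to-left while maintaining a monotonic indentation stack and binary-searching it per query.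
import Mathlib
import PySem

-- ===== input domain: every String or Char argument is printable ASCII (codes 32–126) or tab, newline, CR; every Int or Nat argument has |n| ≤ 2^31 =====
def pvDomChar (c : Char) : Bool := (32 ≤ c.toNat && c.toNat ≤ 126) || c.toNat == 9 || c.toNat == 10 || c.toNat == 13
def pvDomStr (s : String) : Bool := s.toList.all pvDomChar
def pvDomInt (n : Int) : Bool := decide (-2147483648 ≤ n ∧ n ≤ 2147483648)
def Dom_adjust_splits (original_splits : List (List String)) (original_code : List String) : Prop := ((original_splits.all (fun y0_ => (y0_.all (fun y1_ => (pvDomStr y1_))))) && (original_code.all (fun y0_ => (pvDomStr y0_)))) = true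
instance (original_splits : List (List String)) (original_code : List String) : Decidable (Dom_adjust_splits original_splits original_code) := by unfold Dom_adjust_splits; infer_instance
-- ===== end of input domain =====

-- B replaces A's per-split rescan of the code by one right-to-left sweep with a
-- monotonic indentation stack over precomputed indents, answering each block-end
-- query by binary search (an alternative algorithm, not claimed faster).

-- LIST_OF_STRUCTURES and the `s.strip().startswith(LIST_OF_STRUCTURES)` test (same module
-- constant and expression in both Python versions)
def pvStructs : List String := ["def", "for ", "while", "class", "with"]
def pvIsStruct (s : String) : Bool := pvStructs.any (fun p => PySem.Str.startswith (PySem.Str.strip s) p)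
-- len(x) - len(x.lstrip())  (the indentation width, as both Pythons write it)
def pvGap (s : String) : Int := PySem.Str.len s - PySem.Str.len (PySem.Str.lstrip s)

-- ===== PORT A =====
-- the inner `while index < len(original_code): if … <= gap_length: break; index += 1`
def pvWhileA (code : List String) (g : Int) (idx : Int) : Int :=
  if h : idx < (code.length : Int) then
    if pvGap (PySem.List.pyGetD code idx "") ≤ g then idx
    else pvWhileA code g (idx + 1)
  else idx
termination_by ((code.length : Int) - idx).toNat
decreasing_by omega

def pvStepA (code : List String) (st : List (List String) × Int × List Int) (sp : List String) :
    List (List String) × Int × List Int :=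
  let first := PySem.List.pyGetD sp 0 ""
  let g := pvGap first
  if pvIsStruct first then
    let idx := pvWhileA code g (st.2.1 + 1)
    (st.1 ++ [PySem.List.slice code (some st.2.1) (some idx)], st.2.1 + (sp.length : Int), st.2.2 ++ [g])
  else
    (st.1 ++ [sp], st.2.1 + (sp.length : Int), st.2.2 ++ [g])

def adjust_splits (original_splits : List (List String)) (original_code : List String) : List (List String) × List Int :=
  let r := original_splits.foldl (pvStepA original_code) ([], 0, [])
  (r.1, r.2.2)

-- ===== PORT B =====
-- `while stack and stack[-1][1] >= ind: stack.pop()`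
def pvPop (ind : Int) (stk : List (Int × Int)) : List (Int × Int) :=
  if h : stk ≠ [] then
    if ind ≤ (stk.getLast h).2 then pvPop ind stk.dropLast else stk
  else stk
termination_by stk.length
decreasing_by simpa using Nat.sub_lt (List.length_pos_of_ne_nil h) one_pos

-- `while frontier >= low: … push … ; frontier -= 1`
def pvPush (indents : List Int) (stk : List (Int × Int)) (frontier low : Int) :
    List (Int × Int) × Int :=
  if h : low ≤ frontier then
    let ind := PySem.List.pyGetD indents frontier 0
    pvPush indents (pvPop ind stk ++ [(frontier, ind)]) (frontier - 1) low
  else (stk, frontier)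
termination_by (frontier + 1 - low).toNat
decreasing_by omega

-- the hand-written binary search `while lo_i < hi_i: …` (indices are nonnegative ints)
def pvBS (stk : List (Int × Int)) (g : Int) (lo hi : Nat) : Nat :=
  if h : lo < hi then
    let mid := (lo + hi) / 2
    if (PySem.List.pyGetD stk (mid : Int) (0, 0)).2 ≤ g then pvBS stk g (mid + 1) hi
    else pvBS stk g lo mid
  else lo
termination_by hi - lo
decreasing_by all_goals omega

def pvStepB (code : List String) (indents : List Int)
    (st : List (Int × Int) × Int × List (List String))
    (row : List String × Int × Int) : List (Int × Int) × Int × List (List String) :=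
  let s := row.1
  let g := row.2.1
  let start := row.2.2
  if pvIsStruct (PySem.List.pyGetD s 0 "") then
    let low := start + 1
    let pr := pvPush indents st.1 st.2.1 low
    let stk := pr.1
    let c := pvBS stk g 0 stk.length
    let endv := if 0 < c then (PySem.List.pyGetD stk ((c : Int) - 1) (0, 0)).1 else (code.length : Int)
    (stk, pr.2, st.2.2 ++ [PySem.List.slice code (some start) (some endv)])
  else
    (st.1, st.2.1, st.2.2 ++ [s])

def adjust_splits_alt (original_splits : List (List String)) (original_code : List String) : List (List String) × List Int :=
  let indents := original_code.map pvGap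
  let gaps := original_splits.map (fun s => pvGap (PySem.List.pyGetD s 0 ""))
  let sp := original_splits.foldl
    (fun (acc : List Int × Int) s => (acc.1 ++ [acc.2], acc.2 + (s.length : Int))) ([], 0)
  let rows := original_splits.zip (gaps.zip sp.1)
  let r := rows.reverse.foldl (pvStepB original_code indents) ([], (original_code.length : Int) - 1, [])
  (r.2.2.reverse, gaps)

-- ===== PRECONDITION & SPEC =====
-- Pre_ excludes exactly the inputs containing an empty split, on which Python A raises
-- IndexError at original_split[0] (Python B raises there too).
def Pre_adjust_splits (original_splits : List (List String)) (original_code : List String) : Prop :=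
  ∀ s ∈ original_splits, s ≠ []
instance (original_splits : List (List String)) (original_code : List String) : Decidable (Pre_adjust_splits original_splits original_code) := by unfold Pre_adjust_splits; infer_instance

def pvWitness_adjust_splits : List (List String) × List String :=
  ([["def f():"], ["    x = 1"]], ["def f():", "    x = 1"])

def Spec_adjust_splits (original_splits : List (List String)) (original_code : List String) (out : List (List String) × List Int) : Prop := out = adjust_splits_alt original_splits original_code
instance (original_splits : List (List String)) (original_code : List String) (out : List (List String) × List Int) : Decidable (Spec_adjust_splits original_splits original_code out) := by unfold Spec_adjust_splits; infer_instance

-- ===== CLAIM (what is proved, stated in full; the proofs are below) =====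
def Claim_equal_adjust_splits : Prop := ∀ (original_splits : List (List String)) (original_code : List String), Dom_adjust_splits original_splits original_code → Pre_adjust_splits original_splits original_code → Spec_adjust_splits original_splits original_code (adjust_splits original_splits original_code)


-- ===== LEMMAS AND PROOFS =====

-- first index ≥ lo whose indent is ≤ g (clamped at the end of the code)
def pvFirst (inds : List Int) (g : Int) (lo : Nat) : Nat :=
  if h : lo < inds.length then (if inds[lo] ≤ g then lo else pvFirst inds g (lo + 1))
  else inds.length
termination_by inds.length - lo
decreasing_by omega

-- the value both programs produce for one split row (split, gap, start)
def pvRes (code : List String) (row : List String × Int × Int) : List String :=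
  if pvIsStruct (PySem.List.pyGetD row.1 0 "") then
    PySem.List.slice code (some row.2.2)
      (some ((pvFirst (code.map pvGap) row.2.1 ((row.2.2 + 1).toNat) : Nat) : Int))
  else row.1

def pvRowsOf : List (List String) → Int → List (List String × Int × Int)
  | [], _ => []
  | s :: ss, pos => (s, pvGap (PySem.List.pyGetD s 0 ""), pos) :: pvRowsOf ss (pos + (s.length : Int))

def pvStarts : List (List String) → Int → List Int
  | [], _ => []
  | s :: ss, pos => pos :: pvStarts ss (pos + (s.length : Int))

-- the monotonic stack for the window [lo, n): positions increasing? no — positions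
-- descending toward the head is false; entries are (position, indent), indents strictly
-- increasing along the list, last entry is the leftmost candidate
def pvSS (inds : List Int) (lo : Nat) : List (Int × Int) :=
  if h : lo < inds.length then
    (pvSS inds (lo + 1)).takeWhile (fun e => e.2 < inds[lo]) ++ [((lo : Int), inds[lo])]
  else []
termination_by inds.length - lo
decreasing_by omega

lemma pvSS_stop (inds : List Int) (lo : Nat) (h : inds.length ≤ lo) : pvSS inds lo = [] := by
  rw [pvSS]; simp [Nat.not_lt.mpr h]

lemma pvWhileA_eq (code : List String) (g : Int) :
    ∀ (i : Int), 0 ≤ i → i ≤ (code.length : Int) →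
    pvWhileA code g i = ((pvFirst (code.map pvGap) g i.toNat : Nat) : Int) := by
  intro i
  fun_induction pvWhileA code g i with
  | case1 idx h hle =>
    intro h0 _
    rw [pvFirst]
    have hlt : idx.toNat < (code.map pvGap).length := by simp; omega
    have hget : PySem.List.pyGetD code idx "" = code[idx.toNat] :=
      PySem.List.pyGetD_eq_getElem code "" h0 h
    rw [dif_pos hlt]
    have : (code.map pvGap)[idx.toNat] = pvGap code[idx.toNat] := by
      simp
    rw [this, ← hget, if_pos hle]
    omega
  | case2 idx h hle ih =>
    intro h0 h1
    have hlt : idx.toNat < (code.map pvGap).length := by simp; omega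
    rw [pvFirst, dif_pos hlt]
    have hget : PySem.List.pyGetD code idx "" = code[idx.toNat] :=
      PySem.List.pyGetD_eq_getElem code "" h0 h
    have : (code.map pvGap)[idx.toNat] = pvGap code[idx.toNat] := by simp
    rw [this, ← hget, if_neg hle]
    have : (idx + 1).toNat = idx.toNat + 1 := by omega
    rw [← this]
    exact ih (by omega) (by omega)
  | case3 idx h =>
    intro h0 h1
    have : idx = (code.length : Int) := by omega
    subst this
    rw [pvFirst]
    simp

lemma pvSliceA_eq (code : List String) (g : Int) (pos : Int) (h0 : 0 ≤ pos) :
    PySem.List.slice code (some pos) (some (pvWhileA code g (pos + 1))) =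
    PySem.List.slice code (some pos)
      (some ((pvFirst (code.map pvGap) g ((pos + 1).toNat) : Nat) : Int)) := by
  rcases le_or_gt (pos + 1) (code.length : Int) with h | h
  · rw [pvWhileA_eq code g (pos + 1) (by omega) h]
  · -- pos is at or past the end of the code: both slices are empty
    have hpos : code.length ≤ pos.toNat := by omega
    have hw : pvWhileA code g (pos + 1) = pos + 1 := by
      rw [pvWhileA]; rw [dif_neg (by omega)]
    rw [hw]
    rw [PySem.List.slice_toNat code h0 (by omega),
        PySem.List.slice_toNat code h0 (by positivity)]
    rw [List.drop_eq_nil_of_le hpos]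
    simp

lemma pvFoldA (code : List String) :
    ∀ (ss : List (List String)) (adj : List (List String)) (pos : Int) (ind : List Int),
    0 ≤ pos →
    ss.foldl (pvStepA code) (adj, pos, ind) =
      (adj ++ (pvRowsOf ss pos).map (pvRes code),
       pos + (ss.map (fun s => (s.length : Int))).sum,
       ind ++ (pvRowsOf ss pos).map (fun r => r.2.1)) := by
  intro ss
  induction ss with
  | nil => intro adj pos ind _; simp [pvRowsOf]
  | cons s ss ih =>
    intro adj pos ind h0
    simp only [List.foldl_cons, pvStepA]
    by_cases hs : pvIsStruct (PySem.List.pyGetD s 0 "")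
    · rw [if_pos hs]
      rw [ih _ _ _ (by omega)]
      rw [pvSliceA_eq code _ pos h0]
      simp only [pvRowsOf, List.map_cons, pvRes, hs, if_pos, List.map_cons, List.sum_cons]
      refine Prod.ext ?_ (Prod.ext ?_ ?_)
      · simp
      · simp; ring
      · simp
    · rw [if_neg hs]
      rw [ih _ _ _ (by omega)]
      simp only [pvRowsOf, List.map_cons, pvRes, hs, List.map_cons, List.sum_cons]
      refine Prod.ext ?_ (Prod.ext ?_ ?_)
      · simp
      · simp; ring
      · simp

lemma pvSS_sorted (inds : List Int) : ∀ (lo : Nat), (pvSS inds lo).Pairwise (fun a b => a.2 < b.2) := by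
  intro lo
  fun_induction pvSS inds lo with
  | case1 lo h ih =>
    rw [List.pairwise_append]
    refine ⟨ih.sublist (List.takeWhile_sublist _), List.pairwise_singleton _ _, ?_⟩
    intro a ha b hb
    have := List.mem_takeWhile_imp ha
    simp only [List.mem_singleton] at hb
    subst hb
    simpa using this
  | case2 lo h => simp

lemma pvPop_eq (ind : Int) :
    ∀ (st : List (Int × Int)), st.Pairwise (fun a b => a.2 < b.2) →
    pvPop ind st = st.takeWhile (fun e => e.2 < ind) := by
  intro st
  induction st using List.reverseRecOn with
  | nil => rw [pvPop]; simp
  | append_singleton ys y ih =>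
    intro hsort
    rw [pvPop]
    rw [dif_pos (by simp)]
    have hlast : ((ys ++ [y]).getLast (by simp)) = y := List.getLast_concat
    by_cases hc : ind ≤ (((ys ++ [y]).getLast (by simp)).2)
    · rw [if_pos hc]
      rw [hlast] at hc
      have hdl : (ys ++ [y]).dropLast = ys := by simp
      rw [hdl, ih (hsort.sublist (by simp))]
      have hy : (fun e : Int × Int => decide (e.2 < ind)) y = false := by simp; omega
      rw [List.takeWhile_append]
      split_ifs with hlen
      · rw [((List.takeWhile_prefix _).eq_of_length hlen : List.takeWhile _ ys = ys)]
        simp [hy]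
      · rfl
    · rw [if_neg hc]
      rw [hlast] at hc
      symm
      rw [List.takeWhile_eq_self_iff]
      intro e he
      rcases List.mem_append.mp he with he | he
      · have : e.2 < y.2 := by
          rw [List.pairwise_append] at hsort
          exact hsort.2.2 e he y (by simp)
        simp; omega
      · have : e = y := by simpa using he
        subst this
        simp; omega

lemma pvPush_eq (inds : List Int) :
    ∀ (k : Nat) (f low : Int), (f + 1 - low).toNat ≤ k → 1 ≤ low → low ≤ f + 1 → f < (inds.length : Int) →
    pvPush inds (pvSS inds (f + 1).toNat) f low = (pvSS inds low.toNat, low - 1) := by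
  intro k
  induction k with
  | zero =>
    intro f low hk h1 h2 h3
    have hf : low = f + 1 := by omega
    rw [pvPush, dif_neg (by omega)]
    subst hf
    exact Prod.ext rfl (by omega)
  | succ k ih =>
    intro f low hk h1 h2 h3
    by_cases hlf : low ≤ f
    · rw [pvPush, dif_pos hlf]
      have hf0 : 0 ≤ f := by omega
      have hflen : f.toNat < inds.length := by omega
      have hget : PySem.List.pyGetD inds f 0 = inds[f.toNat] :=
        PySem.List.pyGetD_eq_getElem inds 0 hf0 h3
      have hSSf : pvSS inds f.toNat =
          (pvSS inds (f.toNat + 1)).takeWhile (fun e => e.2 < inds[f.toNat]) ++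
            [((f.toNat : Int), inds[f.toNat])] := by
        rw [pvSS, dif_pos hflen]
      have hpop : pvPop (PySem.List.pyGetD inds f 0) (pvSS inds (f + 1).toNat) ++
          [(f, PySem.List.pyGetD inds f 0)] = pvSS inds f.toNat := by
        rw [pvPop_eq _ _ (pvSS_sorted inds _), hSSf]
        have h1' : (f + 1).toNat = f.toNat + 1 := by omega
        have h2' : ((f.toNat : Int)) = f := by omega
        rw [h1', hget, h2']
      show pvPush inds (pvPop (PySem.List.pyGetD inds f 0) (pvSS inds (f + 1).toNat) ++
          [(f, PySem.List.pyGetD inds f 0)]) (f - 1) low = (pvSS inds low.toNat, low - 1)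
      rw [hpop]
      have hres := ih (f - 1) low (by omega) h1 (by omega) (by omega)
      have : (f - 1 + 1).toNat = f.toNat := by omega
      rw [this] at hres
      exact hres
    · have hf : low = f + 1 := by omega
      rw [pvPush, dif_neg (by omega)]
      subst hf
      exact Prod.ext rfl (by omega)

lemma pvLeLengthTakeWhile {α : Type} (p : α → Bool) :
    ∀ (l : List α) (c : Nat), c ≤ l.length → (∀ i (h : i < l.length), i < c → p l[i]) →
    c ≤ (l.takeWhile p).length := by
  intro l
  induction l with
  | nil => intro c hc _; simpa using hc
  | cons a l ih =>
    intro c hc hall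
    match c with
    | 0 => omega
    | c + 1 =>
      have ha : p a = true := hall 0 (by simp) (by omega)
      rw [List.takeWhile_cons, if_pos ha]
      simp only [List.length_cons]
      have := ih c (by simpa using hc) (fun i h hi => hall (i + 1) (by simpa using h) (by omega))
      omega

lemma pvSS_query (inds : List Int) (g : Int) :
    ∀ (lo : Nat), ∃ c, c ≤ (pvSS inds lo).length ∧
      (∀ i (h : i < (pvSS inds lo).length), i < c → ((pvSS inds lo)[i]).2 ≤ g) ∧
      (∀ i (h : i < (pvSS inds lo).length), c ≤ i → g < ((pvSS inds lo)[i]).2) ∧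
      (∀ (hc : 0 < c) (h : c - 1 < (pvSS inds lo).length),
        ((pvSS inds lo)[c - 1]).1 = ((pvFirst inds g lo : Nat) : Int)) ∧
      (c = 0 → pvFirst inds g lo = inds.length) := by
  intro lo
  fun_induction pvSS inds lo with
  | case2 lo h =>
    refine ⟨0, by simp, by simp, by simp, by simp, fun _ => ?_⟩
    rw [pvFirst, dif_neg h]
  | case1 lo h ih =>
    obtain ⟨c', hc'le, hlt', hge', hidx', hzero'⟩ := ih
    set ind := inds[lo] with hind
    set st' := pvSS inds (lo + 1) with hst'
    set tw := st'.takeWhile (fun e => decide (e.2 < ind)) with htw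
    have htwpre : tw <+: st' := List.takeWhile_prefix _
    have htwlen : tw.length ≤ st'.length := htwpre.length_le
    have hlen : (tw ++ [((lo : Int), ind)]).length = tw.length + 1 := by simp
    by_cases hg : ind ≤ g
    · refine ⟨tw.length + 1, by simp, ?_, ?_, ?_, by omega⟩
      · intro i hi _
        rw [hlen] at hi
        rcases Nat.lt_or_ge i tw.length with hi' | hi'
        · rw [List.getElem_append_left hi']
          have hm : tw[i] ∈ tw := List.getElem_mem _
          have := List.mem_takeWhile_imp hm
          simp only [decide_eq_true_eq] at this
          omega
        · have hieq : i = tw.length := by omega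
          subst hieq
          simpa using hg
      · intro i hi hci
        rw [hlen] at hi
        omega
      · intro _ hlt
        have hfi : pvFirst inds g lo = lo := by rw [pvFirst, dif_pos h, if_pos hg]
        simp [hfi]
    · refine ⟨c', ?_, ?_, ?_, ?_, ?_⟩
      · rw [hlen]
        have : c' ≤ tw.length := by
          refine pvLeLengthTakeWhile _ st' c' hc'le (fun i hh hi => ?_)
          have := hlt' i hh hi
          simp only [decide_eq_true_eq]
          omega
        omega
      · intro i hi hci
        have hctw : c' ≤ tw.length := by
          refine pvLeLengthTakeWhile _ st' c' hc'le (fun i hh hi => ?_)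
          have := hlt' i hh hi
          simp only [decide_eq_true_eq]
          omega
        have hi' : i < tw.length := by omega
        rw [List.getElem_append_left hi', htwpre.getElem hi']
        exact hlt' i (by omega) hci
      · intro i hi hci
        rw [hlen] at hi
        rcases Nat.lt_or_ge i tw.length with hi' | hi'
        · rw [List.getElem_append_left hi', htwpre.getElem hi']
          exact hge' i (by omega) hci
        · have hieq : i = tw.length := by omega
          subst hieq
          have : (tw ++ [((lo : Int), ind)])[tw.length] = ((lo : Int), ind) := by
            simp
          rw [this]
          omega
      · intro hc hlt
        have hctw : c' ≤ tw.length := by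
          refine pvLeLengthTakeWhile _ st' c' hc'le (fun i hh hi => ?_)
          have := hlt' i hh hi
          simp only [decide_eq_true_eq]
          omega
        have hi' : c' - 1 < tw.length := by omega
        rw [List.getElem_append_left hi', htwpre.getElem hi']
        rw [pvFirst, dif_pos h, if_neg hg]
        exact hidx' hc (by omega)
      · intro hc
        rw [pvFirst, dif_pos h, if_neg hg]
        exact hzero' hc

lemma pvBS_eq (stk : List (Int × Int)) (g : Int) :
    ∀ (k lo hi c : Nat), hi - lo ≤ k → lo ≤ hi → hi ≤ stk.length → lo ≤ c → c ≤ hi →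
    (∀ i (h : i < stk.length), i < c → (stk[i]).2 ≤ g) →
    (∀ i (h : i < stk.length), c ≤ i → g < (stk[i]).2) →
    pvBS stk g lo hi = c := by
  intro k
  induction k with
  | zero =>
    intro lo hi c hk h1 h2 h3 h4 _ _
    have : lo = c := by omega
    rw [pvBS, dif_neg (by omega)]
    omega
  | succ k ih =>
    intro lo hi c hk h1 h2 h3 h4 hpre hpost
    by_cases hlh : lo < hi
    · rw [pvBS, dif_pos hlh]
      have hmid1 : lo ≤ (lo + hi) / 2 := by omega
      have hmid2 : (lo + hi) / 2 < hi := by omega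
      have hmlen : (lo + hi) / 2 < stk.length := by omega
      have hget : PySem.List.pyGetD stk (((lo + hi) / 2 : Nat) : Int) (0, 0) = stk[(lo + hi) / 2] :=
        PySem.List.pyGetD_eq_getElem stk (0, 0) (by positivity) (by exact_mod_cast hmlen)
      show (if (PySem.List.pyGetD stk (((lo + hi) / 2 : Nat) : Int) (0, 0)).2 ≤ g then
          pvBS stk g ((lo + hi) / 2 + 1) hi else pvBS stk g lo ((lo + hi) / 2)) = c
      rw [hget]
      by_cases hcmp : (stk[(lo + hi) / 2]).2 ≤ g
      · rw [if_pos hcmp]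
        have hmc : (lo + hi) / 2 < c := by
          by_contra hcon
          have := hpost ((lo + hi) / 2) hmlen (by omega)
          omega
        exact ih ((lo + hi) / 2 + 1) hi c (by omega) (by omega) h2 (by omega) h4 hpre hpost
      · rw [if_neg hcmp]
        have hmc : c ≤ (lo + hi) / 2 := by
          by_contra hcon
          have := hpre ((lo + hi) / 2) hmlen (by omega)
          omega
        exact ih lo ((lo + hi) / 2) c (by omega) (by omega) (by omega) h3 (by omega) hpre hpost
    · have : lo = c := by omega
      rw [pvBS, dif_neg (by omega)]
      omega

lemma pvFoldB (code : List String) :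
    ∀ (rv : List (List String × Int × Int)) (s : Nat) (out : List (List String)),
    s ≤ code.length →
    (∀ r ∈ rv, 0 ≤ r.2.2) →
    rv.Pairwise (fun a b => b.2.2 ≤ a.2.2) →
    (∀ r ∈ rv, r.2.2 + 1 ≤ (s : Int) ∨ s = code.length) →
    (rv.foldl (pvStepB code (code.map pvGap)) (pvSS (code.map pvGap) s, (s : Int) - 1, out)).2.2 =
      out ++ rv.map (pvRes code) := by
  intro rv
  induction rv with
  | nil => intro s out _ _ _ _; simp
  | cons r rv ih =>
    intro s out hs hpos hpair hcond
    have hlenmap : (code.map pvGap).length = code.length := by simp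
    simp only [List.foldl_cons]
    by_cases hstruct : pvIsStruct (PySem.List.pyGetD r.1 0 "")
    · have h0r : 0 ≤ r.2.2 := hpos r (List.mem_cons_self)
      by_cases hle : r.2.2 + 1 ≤ (s : Int)
      · -- the push advances the frontier to the query window
        have hs1 : 1 ≤ (s : Int) := by omega
        have hpush := pvPush_eq (code.map pvGap) (((s : Int) - 1) + 1 - (r.2.2 + 1)).toNat
          ((s : Int) - 1) (r.2.2 + 1) le_rfl (by omega) (by omega) (by rw [hlenmap]; omega)
        have hsn : (((s : Int) - 1) + 1).toNat = s := by omega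
        rw [hsn] at hpush
        have hstep : pvStepB code (code.map pvGap) (pvSS (code.map pvGap) s, (s : Int) - 1, out) r =
            (pvSS (code.map pvGap) (r.2.2 + 1).toNat, r.2.2, out ++ [pvRes code r]) := by
          simp only [pvStepB, hstruct, if_true]
          rw [hpush]
          obtain ⟨c, hcle, hcpre, hcpost, hcidx, hczero⟩ :=
            pvSS_query (code.map pvGap) r.2.1 ((r.2.2 + 1).toNat)
          have hbs := pvBS_eq (pvSS (code.map pvGap) (r.2.2 + 1).toNat) r.2.1
            (pvSS (code.map pvGap) (r.2.2 + 1).toNat).length 0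
            (pvSS (code.map pvGap) (r.2.2 + 1).toNat).length c (by omega) (by omega) le_rfl
            (by omega) hcle hcpre hcpost
          rw [hbs]
          have hend : (if 0 < c then
              (PySem.List.pyGetD (pvSS (code.map pvGap) (r.2.2 + 1).toNat) ((c : Int) - 1) (0, 0)).1
              else ((code.length : Nat) : Int)) =
              ((pvFirst (code.map pvGap) r.2.1 ((r.2.2 + 1).toNat) : Nat) : Int) := by
            by_cases hc0 : 0 < c
            · rw [if_pos hc0]
              have hci : (c : Int) - 1 = ((c - 1 : Nat) : Int) := by omega
              rw [hci, PySem.List.pyGetD_natCast,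
                List.getD_eq_getElem _ _ (show c - 1 < _ by omega)]
              exact hcidx hc0 (by omega)
            · rw [if_neg hc0]
              have := hczero (by omega)
              rw [this, hlenmap]
          rw [hend]
          have hres : pvRes code r = PySem.List.slice code (some r.2.2)
              (some ((pvFirst (code.map pvGap) r.2.1 ((r.2.2 + 1).toNat) : Nat) : Int)) := by
            rw [pvRes, if_pos hstruct]
          rw [hres]
          simp
        rw [hstep]
        have hone : (((r.2.2 + 1).toNat : Nat) : Int) - 1 = r.2.2 := by omega
        have hih := ih ((r.2.2 + 1).toNat) (out ++ [pvRes code r]) (by omega)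
          (fun r' hr' => hpos r' (List.mem_cons_of_mem _ hr'))
          (List.Pairwise.sublist (List.sublist_cons_self _ _) hpair)
          (fun r' hr' => by
            have hb := (List.pairwise_cons.mp hpair).1 r' hr'
            left
            omega)
        rw [hone] at hih
        rw [hih]
        simp
      · have hsl : s = code.length := by
          rcases hcond r (List.mem_cons_self) with h | h
          · omega
          · exact h
        subst hsl
        have hempty : pvSS (code.map pvGap) code.length = [] :=
          pvSS_stop _ _ (by omega)
        have hstep : pvStepB code (code.map pvGap)
            (pvSS (code.map pvGap) code.length, (code.length : Int) - 1, out) r =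
            (pvSS (code.map pvGap) code.length, (code.length : Int) - 1, out ++ [pvRes code r]) := by
          simp only [pvStepB, hstruct, if_true]
          rw [pvPush, dif_neg (by omega)]
          have hbs0 : pvBS (pvSS (code.map pvGap) code.length) r.2.1 0
              (pvSS (code.map pvGap) code.length).length = 0 := by
            rw [hempty, pvBS]
            simp
          rw [hbs0]
          have hres : pvRes code r = PySem.List.slice code (some r.2.2)
              (some ((pvFirst (code.map pvGap) r.2.1 ((r.2.2 + 1).toNat) : Nat) : Int)) := by
            rw [pvRes, if_pos hstruct]
          have hfi : pvFirst (code.map pvGap) r.2.1 ((r.2.2 + 1).toNat) = (code.map pvGap).length := by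
            rw [pvFirst, dif_neg (by omega)]
          rw [hres, hfi, hlenmap]
          simp
        rw [hstep]
        have hih := ih code.length (out ++ [pvRes code r]) le_rfl
          (fun r' hr' => hpos r' (List.mem_cons_of_mem _ hr'))
          (List.Pairwise.sublist (List.sublist_cons_self _ _) hpair)
          (fun r' _ => Or.inr rfl)
        rw [hih]
        simp
    · have hstep : pvStepB code (code.map pvGap) (pvSS (code.map pvGap) s, (s : Int) - 1, out) r =
          (pvSS (code.map pvGap) s, (s : Int) - 1, out ++ [r.1]) := by
        simp only [pvStepB, hstruct]
        simp
      rw [hstep]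
      have hih := ih s (out ++ [r.1]) hs
        (fun r' hr' => hpos r' (List.mem_cons_of_mem _ hr'))
        (List.Pairwise.sublist (List.sublist_cons_self _ _) hpair)
        (fun r' hr' => hcond r' (List.mem_cons_of_mem _ hr'))
      rw [hih]
      have hres : pvRes code r = r.1 := by rw [pvRes, if_neg hstruct]
      simp [hres]

lemma pvStartsFold :
    ∀ (ss : List (List String)) (acc : List Int) (pos : Int),
    ss.foldl (fun (acc : List Int × Int) s => (acc.1 ++ [acc.2], acc.2 + (s.length : Int))) (acc, pos) =
      (acc ++ pvStarts ss pos, pos + (ss.map (fun s => (s.length : Int))).sum) := by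
  intro ss
  induction ss with
  | nil => simp [pvStarts]
  | cons s ss ih =>
    intro acc pos
    simp only [List.foldl_cons, ih, pvStarts, List.map_cons, List.sum_cons]
    refine Prod.ext ?_ ?_
    · simp
    · simp; ring

lemma pvRowsZip :
    ∀ (ss : List (List String)) (pos : Int),
    ss.zip ((ss.map (fun s => pvGap (PySem.List.pyGetD s 0 ""))).zip (pvStarts ss pos)) =
      pvRowsOf ss pos := by
  intro ss
  induction ss with
  | nil => simp [pvRowsOf]
  | cons s ss ih => intro pos; simp [pvStarts, pvRowsOf, List.zip_cons_cons, ih]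

lemma pvRowsOf_ge : ∀ (ss : List (List String)) (pos : Int), ∀ r ∈ pvRowsOf ss pos, pos ≤ r.2.2 := by
  intro ss
  induction ss with
  | nil => simp [pvRowsOf]
  | cons s ss ih =>
    intro pos r hr
    simp only [pvRowsOf, List.mem_cons] at hr
    rcases hr with rfl | hr
    · simp
    · have := ih (pos + (s.length : Int)) r hr
      omega

lemma pvRowsOf_pairwise : ∀ (ss : List (List String)) (pos : Int),
    (pvRowsOf ss pos).Pairwise (fun a b => a.2.2 ≤ b.2.2) := by
  intro ss
  induction ss with
  | nil => simp [pvRowsOf]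
  | cons s ss ih =>
    intro pos
    refine List.Pairwise.cons ?_ (ih _)
    intro r hr
    have := pvRowsOf_ge ss (pos + (s.length : Int)) r hr
    simp only
    omega

lemma pvRowsOf_gaps : ∀ (ss : List (List String)) (pos : Int),
    (pvRowsOf ss pos).map (fun r => r.2.1) = ss.map (fun s => pvGap (PySem.List.pyGetD s 0 "")) := by
  intro ss
  induction ss with
  | nil => simp [pvRowsOf]
  | cons s ss ih => intro pos; simp [pvRowsOf, ih]

-- ===== VERDICT (by name: the statement is the Claim_ definition above) =====
theorem adjust_splits_spec : Claim_equal_adjust_splits := by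
  intro splits code _ _
  unfold Spec_adjust_splits
  simp only [adjust_splits, adjust_splits_alt]
  rw [pvFoldA code splits [] 0 [] le_rfl]
  rw [pvStartsFold splits [] 0]
  simp only [List.nil_append]
  rw [pvRowsZip splits 0]
  have hinit : (([] : List (Int × Int)), ((code.length : Int) - 1), ([] : List (List String))) =
      (pvSS (code.map pvGap) code.length, ((code.length : Nat) : Int) - 1, ([] : List (List String))) := by
    rw [pvSS_stop _ _ (by simp)]
  rw [hinit]
  rw [pvFoldB code (pvRowsOf splits 0).reverse code.length [] le_rfl
    (fun r hr => pvRowsOf_ge splits 0 r (List.mem_reverse.mp hr))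
    (List.pairwise_reverse.mpr (pvRowsOf_pairwise splits 0))
    (fun r _ => Or.inr rfl)]
  simp only [List.nil_append, List.map_reverse, List.reverse_reverse]
  rw [pvRowsOf_gaps splits 0]
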